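-- pv_equiv track=rewrite | github.com/kallesiukolaa/Snowflake_extract_db_objects | extract_objects.py | find_real_semicols
-- ===== SOURCE A (Python) =====
-- def get_char_positions_from_string(char, string):
--     return [pos for pos, ch in enumerate(string) if ch == char]
--
-- def commented_positions(string):
--     starts = get_char_positions_from_string('/*', string)
--     ends = get_char_positions_from_string('*/', string)
--     commented = []
--     for start, end in zip(starts, ends):
--         commented = commented + range(start, end + 1)
--     #Check if is in oneline comment
--     comment_chars = ["--", "//"]
--     for comment_char in comment_chars:
--         comments = get_char_positions_from_string(comment_char, string)
--         for comment in comments: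
--             while string[comment] != '\n' and comment < len(string):
--                 commented.append(comment)
--                 comment = comment + 1
--     return commented
--
-- def is_between_chars(position, char_positions):
--     for i in range(len(char_positions) - 1):
--         if position < char_positions[i + 1] and position > char_positions[i] and i % 2 == 0:
--             return True
--     return False
--
-- def remove_from_list(list, sublist):
--     for value in sublist:
--         try:
--             list.remove(value)
--         except ValueError:
--             1==1
--     return list
--
-- def remove_chars_inside(chars_1, chars_2):
--     open_1 = False #Example if we have dfdsfssdfsdf'dfsffd.. its open for '
--     open_2 = False
--     all_values = sorted(chars_1 + chars_2)
--     for value in all_values: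
--         if value in chars_1:
--             if not open_2 and not open_1:
--                 open_1 = True
--                 continue
--             if not open_2 and open_1:
--                 open_1 = False
--                 continue
--             if open_2:
--                 chars_1.remove(value)
--         if value in chars_2:
--             if not open_1 and not open_2:
--                 open_2 = True
--                 continue
--             if not open_1 and open_2:
--                 open_2 = False
--                 continue
--             if open_1:
--                 chars_2.remove(value)
--     return [chars_1, chars_2]
--
-- def find_real_semicols(string):
--     is_quotes = get_char_positions_from_string('\'', string)
--     is_dquotes = get_char_positions_from_string('\"', string)
--     is_scolons = get_char_positions_from_string(';', string)
--     commented = commented_positions(string)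
--     is_quotes = remove_from_list(is_quotes, commented)
--     is_dquotes = remove_from_list(is_dquotes, commented)
--     is_scolons = remove_from_list(is_scolons, commented)
--     #We need to check which quotes and duoble quotes are part of some name etc.
--     [is_quotes, is_dquotes] = remove_chars_inside(is_quotes, is_dquotes)
--     scols = []
--     for pos in is_scolons:
--         if not (is_between_chars(pos, is_quotes) or is_between_chars(pos, is_dquotes)):
--             scols.append(pos)
--     return scols
-- ===== SOURCE B (Python) =====
-- def _bisect_left(ks, p):
--     lo, hi = 0, len(ks)
--     while lo < hi:
--         mid = (lo + hi) // 2
--         if ks[mid] < p: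
--             lo = mid + 1
--         else:
--             hi = mid
--     return lo
--
-- def _inside(p, ks):
--     # ks is strictly increasing; quoted spans are (ks[0],ks[1]), (ks[2],ks[3]), ...
--     idx = _bisect_left(ks, p)
--     return idx % 2 == 1 and idx < len(ks)
--
-- def find_real_semicols(string):
--     # one pass: collect the positions of ', " and ;
--     q1 = []
--     q2 = []
--     semis = []
--     for pos, ch in enumerate(string):
--         if ch == "'":
--             q1.append(pos)
--         elif ch == '"':
--             q2.append(pos)
--         elif ch == ';':
--             semis.append(pos)
--     # two-pointer merge of the two sorted position lists with a quote-state
--     # machine: keep only quote characters not enclosed by the other quote type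
--     k1 = []
--     k2 = []
--     o1 = o2 = False
--     i = j = 0
--     while i < len(q1) or j < len(q2):
--         if j >= len(q2) or (i < len(q1) and q1[i] < q2[j]):
--             v = q1[i]
--             i += 1
--             if not o2:
--                 o1 = not o1
--                 k1.append(v)
--         else:
--             v = q2[j]
--             j += 1
--             if not o1:
--                 o2 = not o2
--                 k2.append(v)
--     # binary search for each semicolon: inside a quoted span or not
--     return [p for p in semis if not (_inside(p, k1) or _inside(p, k2))]
-- ===== Notes on version B (the rewrite author's own statement) =====
-- stated objective: faster
-- what changed: B makes one pass to collect quote/semicolon positions, filters nested quotes with a two-pointer merge of the two sorted position lists instead of A's sorted-union fold with linear membership tests and list.remove, and tests each semicolon with a hand-written binary search over the kept quote positions instead of A's linear scan over all pairs (A's comment handling is dead code: it looks for 2-character tokens among single characters, so it never matches, and B omits it).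
import Mathlib
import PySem

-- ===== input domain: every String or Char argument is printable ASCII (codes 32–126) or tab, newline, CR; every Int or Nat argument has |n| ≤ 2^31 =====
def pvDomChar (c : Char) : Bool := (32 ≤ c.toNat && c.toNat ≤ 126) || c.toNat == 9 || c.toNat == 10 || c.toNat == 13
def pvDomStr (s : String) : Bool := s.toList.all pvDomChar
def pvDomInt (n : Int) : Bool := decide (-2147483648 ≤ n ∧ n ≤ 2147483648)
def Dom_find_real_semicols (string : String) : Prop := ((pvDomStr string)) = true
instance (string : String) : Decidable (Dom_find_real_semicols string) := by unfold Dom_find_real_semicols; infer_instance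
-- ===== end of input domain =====

-- B replaces A's repeated list scans, list.remove mutation and per-semicolon pair scans by one
-- collection pass, a two-pointer merge of the two quote-position lists, and a binary search per
-- semicolon.

-- ===== PORT A =====

-- [pos for pos, ch in enumerate(string) if ch == char]  (ch is a 1-char string; char may be longer)
def get_char_positions_from_string (char : String) (string : String) : List Int :=
  ((PySem.List.enumerate string.toList 0).filter (fun p => String.mk [p.2] == char)).map (fun p => p.1)

-- while string[comment] != '\n' and comment < len(string): commented.append(comment); comment += 1
-- (fueled; PySem.List.pyGet? none = IndexError, modelled as stop: the loop is never reached, since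
-- get_char_positions_from_string never matches the 2-char token "--"/"//")
def commented_while (s : List Char) (fuel : Nat) (comment : Int) (acc : List Int) : List Int :=
  match fuel with
  | 0 => acc
  | fuel + 1 =>
    match PySem.List.pyGet? s comment with
    | none => acc
    | some c =>
      if c ≠ '\n' ∧ comment < (s.length : Int) then
        commented_while s fuel (comment + 1) (acc ++ [comment])
      else acc

def commented_positions (string : String) : List Int :=
  let starts := get_char_positions_from_string "/*" string
  let ends := get_char_positions_from_string "*/" string
  -- commented = commented + range(start, end + 1)  (list+range raises in Python 3; unreachable, zip is empty)
  let commented := (starts.zip ends).foldl (fun acc p => acc ++ PySem.List.pyRange p.1 (p.2 + 1) 1) []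
  let comment_chars := ["--", "//"]
  comment_chars.foldl (fun commented cc =>
    (get_char_positions_from_string cc string).foldl (fun commented comment =>
      commented_while string.toList (string.toList.length + 1) comment commented) commented) commented

-- for i in range(len(char_positions)-1): if …: return True;  return False
-- (getD 0: both indices are always in range for i < len - 1)
def is_between_chars (position : Int) (char_positions : List Int) : Bool :=
  (List.range (char_positions.length - 1)).any (fun i =>
    position < char_positions.getD (i + 1) 0 && position > char_positions.getD i 0 && i % 2 == 0)

-- list.remove(value) with ValueError ignored
def remove_from_list (list : List Int) (sublist : List Int) : List Int :=
  sublist.foldl (fun l v => (PySem.List.remove? l v).getD l) list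

-- the body of remove_chars_inside's loop from `if value in chars_2:` on
def rci_c2block (o1 o2 : Bool) (c1 c2 : List Int) (value : Int) :
    Bool × Bool × List Int × List Int :=
  if c2.contains value then
    if !o1 && !o2 then (o1, true, c1, c2)
    else if !o1 && o2 then (o1, false, c1, c2)
    else if o1 then (o1, o2, c1, (PySem.List.remove? c2 value).getD c2)
    else (o1, o2, c1, c2)
  else (o1, o2, c1, c2)

-- one iteration of remove_chars_inside's `for value in all_values:` loop
def rci_step (st : Bool × Bool × List Int × List Int) (value : Int) :
    Bool × Bool × List Int × List Int :=
  let o1 := st.1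
  let o2 := st.2.1
  let c1 := st.2.2.1
  let c2 := st.2.2.2
  if c1.contains value then
    if !o2 && !o1 then (true, o2, c1, c2)
    else if !o2 && o1 then (false, o2, c1, c2)
    else if o2 then rci_c2block o1 o2 ((PySem.List.remove? c1 value).getD c1) c2 value
    else rci_c2block o1 o2 c1 c2 value
  else rci_c2block o1 o2 c1 c2 value

def remove_chars_inside (chars_1 chars_2 : List Int) : List Int × List Int :=
  let all_values := PySem.List.sorted (chars_1 ++ chars_2) (fun x => x) false
  let st := all_values.foldl rci_step (false, false, chars_1, chars_2)
  (st.2.2.1, st.2.2.2)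

def find_real_semicols (string : String) : List Int :=
  let is_quotes := get_char_positions_from_string "'" string
  let is_dquotes := get_char_positions_from_string "\"" string
  let is_scolons := get_char_positions_from_string ";" string
  let commented := commented_positions string
  let is_quotes := remove_from_list is_quotes commented
  let is_dquotes := remove_from_list is_dquotes commented
  let is_scolons := remove_from_list is_scolons commented
  let qs := remove_chars_inside is_quotes is_dquotes
  is_scolons.foldl (fun scols pos =>
    if !(is_between_chars pos qs.1 || is_between_chars pos qs.2) then scols ++ [pos]
    else scols) []

-- ===== PORT B =====

-- Source B's hand-written bisect_left loop is exactly PySem.List.bisectLeft (same fueled lo/hi loop)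
def bInside (p : Int) (ks : List Int) : Bool :=
  let idx := PySem.List.bisectLeft ks p
  idx % 2 == 1 && idx < ks.length

-- one pass over enumerate(string) collecting ', " and ; positions
def bCollectStep (acc : List Int × List Int × List Int) (pc : Int × Char) :
    List Int × List Int × List Int :=
  if pc.2 == '\'' then (acc.1 ++ [pc.1], acc.2.1, acc.2.2)
  else if pc.2 == '"' then (acc.1, acc.2.1 ++ [pc.1], acc.2.2)
  else if pc.2 == ';' then (acc.1, acc.2.1, acc.2.2 ++ [pc.1])
  else acc

def bCollect (string : String) : List Int × List Int × List Int :=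
  (PySem.List.enumerate string.toList 0).foldl bCollectStep ([], [], [])

-- the two-pointer merge loop of Source B (indices i/j become list suffixes)
def bMergeLoop : Bool → Bool → List Int → List Int → List Int → List Int → List Int × List Int
  | _, _, [], [], k1, k2 => (k1, k2)
  | o1, o2, v :: t1, [], k1, k2 =>
    if !o2 then bMergeLoop (!o1) o2 t1 [] (k1 ++ [v]) k2
    else bMergeLoop o1 o2 t1 [] k1 k2
  | o1, o2, [], w :: t2, k1, k2 =>
    if !o1 then bMergeLoop o1 (!o2) [] t2 k1 (k2 ++ [w])
    else bMergeLoop o1 o2 [] t2 k1 k2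
  | o1, o2, v :: t1, w :: t2, k1, k2 =>
    if v < w then
      if !o2 then bMergeLoop (!o1) o2 t1 (w :: t2) (k1 ++ [v]) k2
      else bMergeLoop o1 o2 t1 (w :: t2) k1 k2
    else
      if !o1 then bMergeLoop o1 (!o2) (v :: t1) t2 k1 (k2 ++ [w])
      else bMergeLoop o1 o2 (v :: t1) t2 k1 k2

def find_real_semicols_alt (string : String) : List Int :=
  let c := bCollect string
  let ks := bMergeLoop false false c.1 c.2.1 [] []
  c.2.2.filter (fun p => !(bInside p ks.1 || bInside p ks.2))

-- ===== PRECONDITION & SPEC =====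
def Spec_find_real_semicols (string : String) (out : List Int) : Prop := out = find_real_semicols_alt string
instance (string : String) (out : List Int) : Decidable (Spec_find_real_semicols string out) := by unfold Spec_find_real_semicols; infer_instance

-- ===== CLAIM (what is proved, stated in full; the proofs are below) =====
def Claim_equal_find_real_semicols : Prop := ∀ (string : String), Dom_find_real_semicols string → Spec_find_real_semicols string (find_real_semicols string)

-- ===== LEMMAS AND PROOFS =====

-- positions of a single character: the common spine of both programs (proof-side)
def posOf (c : Char) (s : List Char) : List Int :=
  ((PySem.List.enumerate s 0).filter (fun p => p.2 == c)).map (fun p => p.1)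
theorem toList_mk (l : List Char) : (String.mk l).toList = l :=
  Eq.symm (String.ofList_eq.mp rfl)
theorem mk_single_beq (c d : Char) : (String.mk [c] == String.mk [d]) = (c == d) := by
  rcases Bool.eq_false_or_eq_true (c == d) with h | h <;> simp_all [String.ext_iff, toList_mk]
theorem mk_single_ne_two (c a b : Char) : (String.mk [c] == String.mk [a, b]) = false := by
  simp [String.ext_iff, toList_mk]
theorem gcp_single (c : Char) (s : String) :
    get_char_positions_from_string (String.mk [c]) s = posOf c s.toList := by
  simp only [get_char_positions_from_string, posOf, mk_single_beq]
theorem gcp_two_nil (a b : Char) (s : String) :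
    get_char_positions_from_string (String.mk [a, b]) s = [] := by
  simp [get_char_positions_from_string, mk_single_ne_two]
theorem mem_posOf {c : Char} {s : List Char} {x : Int} :
    x ∈ posOf c s ↔ ∃ (k : Nat) (h : k < s.length), x = (k : Int) ∧ s[k] = c := by
  simp only [posOf, List.mem_map, List.mem_filter, PySem.List.mem_enumerate_iff]
  constructor
  · rintro ⟨p, ⟨⟨k, h, rfl⟩, hc⟩, rfl⟩
    exact ⟨k, h, by simp, by simpa using hc⟩
  · rintro ⟨k, h, rfl, hc⟩
    exact ⟨((k : Int), s[k]), ⟨⟨k, h, by simp⟩, by simp [hc]⟩, rfl⟩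
theorem posOf_pairwise (c : Char) (s : List Char) : (posOf c s).Pairwise (· < ·) := by
  have h := (PySem.List.pairwise_lt_enumerate s 0).filter (fun p => p.2 == c)
  exact List.pairwise_map.mpr h
theorem posOf_disjoint {c d : Char} (h : c ≠ d) (s : List Char) :
    ∀ x ∈ posOf c s, x ∉ posOf d s := by
  intro x hx hy
  obtain ⟨k, hk, rfl, hc⟩ := mem_posOf.mp hx
  obtain ⟨k', hk', he, hd'⟩ := mem_posOf.mp hy
  have : k = k' := by exact_mod_cast he
  subst this
  exact h (hc ▸ hd' ▸ rfl)

theorem commented_positions_nil (s : String) : commented_positions s = [] := by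
  have h1 : ("/*" : String) = String.mk ['/', '*'] := rfl
  have h2 : ("*/" : String) = String.mk ['*', '/'] := rfl
  have h3 : ("--" : String) = String.mk ['-', '-'] := rfl
  have h4 : ("//" : String) = String.mk ['/', '/'] := rfl
  simp [commented_positions, h1, h2, h3, h4, gcp_two_nil]
theorem collect_go (l : List (Int × Char)) (a b c : List Int) :
    l.foldl bCollectStep (a, b, c) =
    (a ++ (l.filter (fun p => p.2 == '\'')).map (fun p => p.1),
     b ++ (l.filter (fun p => p.2 == '"')).map (fun p => p.1),
     c ++ (l.filter (fun p => p.2 == ';')).map (fun p => p.1)) := by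
  induction l generalizing a b c with
  | nil => simp
  | cons p t ih =>
    rw [List.foldl_cons]
    by_cases h1 : p.2 = '\''
    · have hs : bCollectStep (a, b, c) p = (a ++ [p.1], b, c) := by simp [bCollectStep, h1]
      rw [hs, ih]
      simp [h1]
    · by_cases h2 : p.2 = '"'
      · have hs : bCollectStep (a, b, c) p = (a, b ++ [p.1], c) := by
          simp [bCollectStep, h2]
        rw [hs, ih]
        simp [h2]
      · by_cases h3 : p.2 = ';'
        · have hs : bCollectStep (a, b, c) p = (a, b, c ++ [p.1]) := by
            simp [bCollectStep, h3]
          rw [hs, ih]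
          simp [h3]
        · have hs : bCollectStep (a, b, c) p = (a, b, c) := by simp [bCollectStep, h1, h2, h3]
          rw [hs, ih]
          simp [h1, h2, h3]

theorem collect_eq (s : String) :
    bCollect s = (posOf '\'' s.toList, posOf '"' s.toList, posOf ';' s.toList) := by
  simpa [bCollect, posOf] using collect_go (PySem.List.enumerate s.toList 0) [] [] []

theorem between_eq_inside (p : Int) (ks : List Int)
    (hs : ks.Pairwise (· < ·)) (hp : p ∉ ks) :
    is_between_chars p ks = bInside p ks := by
  have hle : ks.Pairwise (· ≤ ·) := hs.imp le_of_lt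
  obtain ⟨hlen, hlt, hge⟩ := PySem.List.bisectLeft_spec ks p hle
  set idx := PySem.List.bisectLeft ks p with hidx
  rw [Bool.eq_iff_iff]
  simp only [is_between_chars, bInside, List.any_eq_true, List.mem_range, Bool.and_eq_true,
    decide_eq_true_eq, beq_iff_eq, Nat.lt_iff_add_one_le]
  constructor
  · rintro ⟨i, hi, ⟨h2, h3⟩, hev⟩
    have hi1 : i + 1 < ks.length := by omega
    have hi0 : i < ks.length := by omega
    rw [List.getD_eq_getElem ks 0 hi1] at h2
    rw [List.getD_eq_getElem ks 0 hi0] at h3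
    -- idx = i + 1
    have hgt : i < idx := by
      by_contra hh
      exact absurd (hge i hi0 (by omega)) (by omega)
    have hlt2 : idx ≤ i + 1 := by
      by_contra hh
      have := hlt (i + 1) hi1 (by omega)
      omega
    have : idx = i + 1 := by omega
    constructor
    · omega
    · omega
  · rintro ⟨hodd, hlen2⟩
    have h1 : 1 ≤ idx := by omega
    have hidxlt : idx < ks.length := by omega
    have hi0 : idx - 1 < ks.length := by omega
    refine ⟨idx - 1, by omega, ⟨?_, ?_⟩, by omega⟩
    · rw [List.getD_eq_getElem ks 0 (show idx - 1 + 1 < ks.length by omega)]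
      have := hge idx hidxlt (by omega)
      have hne : p ≠ ks[idx] := by
        intro h
        exact hp (h ▸ List.getElem_mem hidxlt)
      have : p ≤ ks[idx] := hge idx hidxlt (by omega)
      have h4 : ks[idx - 1 + 1] = ks[idx] := by congr 1; omega
      rw [h4]
      omega
    · rw [List.getD_eq_getElem ks 0 hi0]
      exact hlt (idx - 1) hi0 (by omega)

-- plain increasing merge (proof-side): the order in which A's sorted fold visits values
def mergeL : List Int → List Int → List Int
  | [], [] => []
  | [], y :: ys => y :: mergeL [] ys
  | x :: xs, [] => x :: mergeL xs []
  | x :: xs, y :: ys =>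
    if x < y then x :: mergeL xs (y :: ys) else y :: mergeL (x :: xs) ys

theorem mem_mergeL {z : Int} (xs ys : List Int) : z ∈ mergeL xs ys ↔ z ∈ xs ∨ z ∈ ys := by
  fun_induction mergeL xs ys <;> simp_all <;> tauto

theorem mergeL_perm (xs ys : List Int) : (mergeL xs ys).Perm (xs ++ ys) := by
  fun_induction mergeL xs ys with
  | case1 => simp
  | case2 y ys ih => simpa using ih
  | case3 x xs ih => simpa using ih
  | case4 x xs y ys h ih => simpa using ih.cons x
  | case5 x xs y ys h ih =>
    exact List.Perm.trans (ih.cons y) (List.Perm.symm List.perm_middle)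

theorem mergeL_pairwise (xs ys : List Int)
    (hx : xs.Pairwise (· < ·)) (hy : ys.Pairwise (· < ·))
    (hd : ∀ x ∈ xs, x ∉ ys) : (mergeL xs ys).Pairwise (· < ·) := by
  fun_induction mergeL xs ys with
  | case1 => simp
  | case2 y ys ih =>
    rw [List.pairwise_cons]
    refine ⟨?_, ih (by simp) (hy.of_cons) (by simp)⟩
    intro z hz
    rw [mem_mergeL] at hz
    rcases hz with hz | hz
    · simp at hz
    · exact (List.pairwise_cons.mp hy).1 z hz
  | case3 x xs ih =>
    rw [List.pairwise_cons]
    refine ⟨?_, ih hx.of_cons (by simp) (by simp)⟩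
    intro z hz
    rw [mem_mergeL] at hz
    rcases hz with hz | hz
    · exact (List.pairwise_cons.mp hx).1 z hz
    · simp at hz
  | case4 x xs y ys h ih =>
    rw [List.pairwise_cons]
    refine ⟨?_, ih hx.of_cons hy (fun a ha => hd a (by simp [ha]))⟩
    intro z hz
    rw [mem_mergeL] at hz
    rcases hz with hz | hz
    · exact (List.pairwise_cons.mp hx).1 z hz
    · rcases List.mem_cons.mp hz with rfl | hz
      · exact h
      · exact lt_trans h ((List.pairwise_cons.mp hy).1 z hz)
  | case5 x xs y ys h ih =>
    have hxy : y < x := by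
      rcases lt_or_eq_of_le (not_lt.mp h) with h' | h'
      · exact h'
      · exact absurd (by simp [h']) (hd x (by simp))
    rw [List.pairwise_cons]
    refine ⟨?_, ih hx hy.of_cons (fun a ha hb => hd a ha (by simp [hb]))⟩
    intro z hz
    rw [mem_mergeL] at hz
    rcases hz with hz | hz
    · rcases List.mem_cons.mp hz with rfl | hz
      · exact hxy
      · exact lt_trans hxy ((List.pairwise_cons.mp hx).1 z hz)
    · exact (List.pairwise_cons.mp hy).1 z hz

theorem sorted_eq_mergeL (q1 q2 : List Int)
    (h1 : q1.Pairwise (· < ·)) (h2 : q2.Pairwise (· < ·))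
    (hd : ∀ x ∈ q1, x ∉ q2) :
    PySem.List.sorted (q1 ++ q2) (fun x => x) false = mergeL q1 q2 :=
  PySem.List.sorted_eq_of_perm_of_pairwise_lt _ _ _ (mergeL_perm q1 q2)
    (mergeL_pairwise q1 q2 h1 h2 hd)

-- accumulator-free version of B's merge machine (proof-side)
def keptP : Bool → Bool → List Int → List Int → List Int × List Int
  | _, _, [], [] => ([], [])
  | o1, o2, v :: t1, [] =>
    if !o2 then ((v :: (keptP (!o1) o2 t1 []).1, (keptP (!o1) o2 t1 []).2))
    else keptP o1 o2 t1 []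
  | o1, o2, [], w :: t2 =>
    if !o1 then ((keptP o1 (!o2) [] t2).1, w :: (keptP o1 (!o2) [] t2).2)
    else keptP o1 o2 [] t2
  | o1, o2, v :: t1, w :: t2 =>
    if v < w then
      if !o2 then ((v :: (keptP (!o1) o2 t1 (w :: t2)).1, (keptP (!o1) o2 t1 (w :: t2)).2))
      else keptP o1 o2 t1 (w :: t2)
    else
      if !o1 then ((keptP o1 (!o2) (v :: t1) t2).1, w :: (keptP o1 (!o2) (v :: t1) t2).2)
      else keptP o1 o2 (v :: t1) t2

theorem bMergeLoop_eq_keptP (o1 o2 : Bool) (r1 r2 k1 k2 : List Int) :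
    bMergeLoop o1 o2 r1 r2 k1 k2 =
      (k1 ++ (keptP o1 o2 r1 r2).1, k2 ++ (keptP o1 o2 r1 r2).2) := by
  fun_induction bMergeLoop o1 o2 r1 r2 k1 k2 with
  | case8 o1 o2 v t1 w t2 k1 k2 hwv ho ih =>
    rw [ih]
    simp [keptP, if_neg hwv, ho]
  | case9 o1 o2 v t1 w t2 k1 k2 hwv ho ih =>
    rw [ih]
    simp [keptP, if_neg hwv, ho]
  | _ => simp_all [keptP]

theorem keptP_sub (o1 o2 : Bool) (r1 r2 : List Int) :
    (∀ x ∈ (keptP o1 o2 r1 r2).1, x ∈ r1) ∧ (∀ x ∈ (keptP o1 o2 r1 r2).2, x ∈ r2) := by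
  fun_induction keptP o1 o2 r1 r2 <;> simp_all


theorem keptP_pairwise (o1 o2 : Bool) (r1 r2 : List Int)
    (h1 : r1.Pairwise (· < ·)) (h2 : r2.Pairwise (· < ·)) :
    (keptP o1 o2 r1 r2).1.Pairwise (· < ·) ∧ (keptP o1 o2 r1 r2).2.Pairwise (· < ·) := by
  fun_induction keptP o1 o2 r1 r2 with
  | case1 => simp
  | case2 o1 o2 v t1 h ih =>
    have hp := List.pairwise_cons.mp h1
    refine ⟨?_, (ih hp.2 h2).2⟩
    rw [List.pairwise_cons]
    exact ⟨fun z hz => hp.1 z ((keptP_sub _ _ _ _).1 z hz), (ih hp.2 h2).1⟩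
  | case3 o1 o2 v t1 h ih => exact ih (List.pairwise_cons.mp h1).2 h2
  | case4 o1 o2 w t2 h ih =>
    have hp := List.pairwise_cons.mp h2
    refine ⟨(ih h1 hp.2).1, ?_⟩
    rw [List.pairwise_cons]
    exact ⟨fun z hz => hp.1 z ((keptP_sub _ _ _ _).2 z hz), (ih h1 hp.2).2⟩
  | case5 o1 o2 w t2 h ih => exact ih h1 (List.pairwise_cons.mp h2).2
  | case6 o1 o2 v t1 w t2 hvw h ih =>
    have hp := List.pairwise_cons.mp h1
    refine ⟨?_, (ih hp.2 h2).2⟩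
    rw [List.pairwise_cons]
    refine ⟨fun z hz => ?_, (ih hp.2 h2).1⟩
    exact hp.1 z ((keptP_sub _ _ _ _).1 z hz)
  | case7 o1 o2 v t1 w t2 hvw h ih => exact ih (List.pairwise_cons.mp h1).2 h2
  | case8 o1 o2 v t1 w t2 hvw h ih =>
    have hp := List.pairwise_cons.mp h2
    refine ⟨(ih h1 hp.2).1, ?_⟩
    rw [List.pairwise_cons]
    exact ⟨fun z hz => hp.1 z ((keptP_sub _ _ _ _).2 z hz), (ih h1 hp.2).2⟩
  | case9 o1 o2 v t1 w t2 hvw h ih => exact ih h1 (List.pairwise_cons.mp h2).2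

theorem remove?_append_not_mem (v : Int) (t d : List Int) (hd : v ∉ d) :
    PySem.List.remove? (d ++ v :: t) v = some (d ++ t) := by
  induction d with
  | nil => simp
  | cons a d ih =>
    have ha : a ≠ v := by intro h; exact hd (by simp [h])
    rw [List.cons_append, PySem.List.remove?_cons_of_ne _ ha,
      ih (fun h => hd (List.mem_cons_of_mem a h))]
    rfl

-- one step of A's machine on a value sitting at the head of the single-quote side
theorem rci_step_left (o1 o2 : Bool) (d1 t1 d2 r2 : List Int) (v : Int)
    (hd1 : v ∉ d1) (hd2 : v ∉ d2) (hr2 : v ∉ r2) :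
    rci_step (o1, o2, d1 ++ v :: t1, d2 ++ r2) v =
      if o2 then (o1, o2, d1 ++ t1, d2 ++ r2)
      else (!o1, o2, d1 ++ v :: t1, d2 ++ r2) := by
  cases o2 <;> cases o1 <;>
    simp [rci_step, rci_c2block, hd1, hd2, hr2, remove?_append_not_mem v t1 d1 hd1]

-- one step of A's machine on a value sitting at the head of the double-quote side
theorem rci_step_right (o1 o2 : Bool) (d1 r1 d2 t2 : List Int) (w : Int)
    (hd1 : w ∉ d1) (hr1 : w ∉ r1) (hd2 : w ∉ d2) :
    rci_step (o1, o2, d1 ++ r1, d2 ++ w :: t2) w =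
      if o1 then (o1, o2, d1 ++ r1, d2 ++ t2)
      else (o1, !o2, d1 ++ r1, d2 ++ w :: t2) := by
  cases o1 <;> cases o2 <;>
    simp [rci_step, rci_c2block, hd1, hr1, hd2, remove?_append_not_mem w t2 d2 hd2]

theorem main_fold :
    ∀ (n : Nat) (r1 r2 : List Int), r1.length + r2.length = n →
    ∀ (o1 o2 : Bool) (d1 d2 : List Int),
    r1.Pairwise (· < ·) → r2.Pairwise (· < ·) →
    (∀ x ∈ r1, x ∉ r2) →
    (∀ a ∈ d1, ∀ b, (b ∈ r1 ∨ b ∈ r2) → a < b) →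
    (∀ a ∈ d2, ∀ b, (b ∈ r1 ∨ b ∈ r2) → a < b) →
    ((mergeL r1 r2).foldl rci_step (o1, o2, d1 ++ r1, d2 ++ r2)).2.2 =
      (d1 ++ (keptP o1 o2 r1 r2).1, d2 ++ (keptP o1 o2 r1 r2).2) := by
  intro n
  induction n using Nat.strong_induction_on with
  | _ n ih =>
  intro r1 r2 hn o1 o2 d1 d2 h1 h2 hdisj hL1 hL2
  rcases r1 with _ | ⟨v, t1⟩
  · rcases r2 with _ | ⟨w, t2⟩
    · simp [mergeL, keptP]
    · simp only [mergeL]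
      rw [List.foldl_cons]
      have hwd1 : w ∉ d1 := fun hw => lt_irrefl w (hL1 w hw w (by simp))
      have hwd2 : w ∉ d2 := fun hw => lt_irrefl w (hL2 w hw w (by simp))
      rw [rci_step_right o1 o2 d1 [] d2 t2 w hwd1 (by simp) hwd2]
      cases o1 with
      | true =>
        rw [if_pos rfl]
        rw [ih t2.length (by simp at hn; omega) [] t2 (by simp) true o2 d1 d2 (by simp)
          h2.of_cons (by simp)
          (fun a ha b hb => hL1 a ha b (by cases hb with | inl h => simp at h | inr h => exact Or.inr (List.mem_cons_of_mem _ h)))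
          (fun a ha b hb => hL2 a ha b (by cases hb with | inl h => simp at h | inr h => exact Or.inr (List.mem_cons_of_mem _ h)))]
        simp [keptP]
      | false =>
        rw [if_neg (by simp)]
        rw [show d2 ++ w :: t2 = (d2 ++ [w]) ++ t2 by simp]
        rw [ih t2.length (by simp at hn; omega) [] t2 (by simp) false (!o2) d1 (d2 ++ [w])
          (by simp) h2.of_cons (by simp)
          (fun a ha b hb => hL1 a ha b (by cases hb with | inl h => simp at h | inr h => exact Or.inr (List.mem_cons_of_mem _ h)))
          (fun a ha b hb => by
            rcases List.mem_append.mp ha with ha' | ha'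
            · exact hL2 a ha' b (by cases hb with | inl h => simp at h | inr h => exact Or.inr (List.mem_cons_of_mem _ h))
            · have haw : a = w := by simpa using ha'
              subst haw
              cases hb with
              | inl h => simp at h
              | inr h => exact (List.pairwise_cons.mp h2).1 b h)]
        simp [keptP]
  · rcases r2 with _ | ⟨w, t2⟩
    · simp only [mergeL]
      rw [List.foldl_cons]
      have hvd1 : v ∉ d1 := fun hv => lt_irrefl v (hL1 v hv v (by simp))
      have hvd2 : v ∉ d2 := fun hv => lt_irrefl v (hL2 v hv v (by simp))
      rw [rci_step_left o1 o2 d1 t1 d2 [] v hvd1 hvd2 (by simp)]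
      cases o2 with
      | true =>
        rw [if_pos rfl]
        rw [ih t1.length (by simp at hn; omega) t1 [] (by simp) o1 true d1 d2
          h1.of_cons (by simp) (by simp)
          (fun a ha b hb => hL1 a ha b (by cases hb with | inl h => exact Or.inl (List.mem_cons_of_mem _ h) | inr h => simp at h))
          (fun a ha b hb => hL2 a ha b (by cases hb with | inl h => exact Or.inl (List.mem_cons_of_mem _ h) | inr h => simp at h))]
        simp [keptP]
      | false =>
        rw [if_neg (by simp)]
        rw [show d1 ++ v :: t1 = (d1 ++ [v]) ++ t1 by simp]
        rw [ih t1.length (by simp at hn; omega) t1 [] (by simp) (!o1) false (d1 ++ [v]) d2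
          h1.of_cons (by simp) (by simp)
          (fun a ha b hb => by
            rcases List.mem_append.mp ha with ha' | ha'
            · exact hL1 a ha' b (by cases hb with | inl h => exact Or.inl (List.mem_cons_of_mem _ h) | inr h => simp at h)
            · have hav : a = v := by simpa using ha'
              subst hav
              cases hb with
              | inl h => exact (List.pairwise_cons.mp h1).1 b h
              | inr h => simp at h)
          (fun a ha b hb => hL2 a ha b (by cases hb with | inl h => exact Or.inl (List.mem_cons_of_mem _ h) | inr h => simp at h))]
        simp [keptP]
    · simp only [mergeL]
      by_cases hvw : v < w
      · rw [if_pos hvw, List.foldl_cons]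
        have hvd1 : v ∉ d1 := fun hv => lt_irrefl v (hL1 v hv v (by simp))
        have hvd2 : v ∉ d2 := fun hv => lt_irrefl v (hL2 v hv v (by simp))
        have hvr2 : v ∉ w :: t2 := hdisj v (by simp)
        rw [rci_step_left o1 o2 d1 t1 d2 (w :: t2) v hvd1 hvd2 hvr2]
        cases o2 with
        | true =>
          rw [if_pos rfl]
          rw [ih (t1.length + (t2.length + 1)) (by simp at hn ⊢; omega) t1 (w :: t2) (by simp)
            o1 true d1 d2 h1.of_cons h2
            (fun x hx => hdisj x (List.mem_cons_of_mem _ hx))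
            (fun a ha b hb => hL1 a ha b (by cases hb with | inl h => exact Or.inl (List.mem_cons_of_mem _ h) | inr h => exact Or.inr h))
            (fun a ha b hb => hL2 a ha b (by cases hb with | inl h => exact Or.inl (List.mem_cons_of_mem _ h) | inr h => exact Or.inr h))]
          simp [keptP, hvw]
        | false =>
          rw [if_neg (by simp)]
          rw [show d1 ++ v :: t1 = (d1 ++ [v]) ++ t1 by simp]
          rw [ih (t1.length + (t2.length + 1)) (by simp at hn ⊢; omega) t1 (w :: t2) (by simp)
            (!o1) false (d1 ++ [v]) d2 h1.of_cons h2
            (fun x hx => hdisj x (List.mem_cons_of_mem _ hx))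
            (fun a ha b hb => by
              rcases List.mem_append.mp ha with ha' | ha'
              · exact hL1 a ha' b (by cases hb with | inl h => exact Or.inl (List.mem_cons_of_mem _ h) | inr h => exact Or.inr h)
              · have hav : a = v := by simpa using ha'
                subst hav
                cases hb with
                | inl h => exact (List.pairwise_cons.mp h1).1 b h
                | inr h =>
                  rcases List.mem_cons.mp h with rfl | h
                  · exact hvw
                  · exact lt_trans hvw ((List.pairwise_cons.mp h2).1 b h))
            (fun a ha b hb => hL2 a ha b (by cases hb with | inl h => exact Or.inl (List.mem_cons_of_mem _ h) | inr h => exact Or.inr h))]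
          simp [keptP, hvw]
      · rw [if_neg hvw, List.foldl_cons]
        have hwr1 : w ∉ v :: t1 := fun hw => hdisj w hw (by simp)
        have hwv : w < v := by
          rcases lt_or_eq_of_le (not_lt.mp hvw) with h' | h'
          · exact h'
          · exact absurd (h' ▸ List.mem_cons_self) hwr1
        have hwd1 : w ∉ d1 := fun hw => lt_irrefl w (hL1 w hw w (by simp))
        have hwd2 : w ∉ d2 := fun hw => lt_irrefl w (hL2 w hw w (by simp))
        rw [rci_step_right o1 o2 d1 (v :: t1) d2 t2 w hwd1 hwr1 hwd2]
        cases o1 with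
        | true =>
          rw [if_pos rfl]
          rw [ih ((t1.length + 1) + t2.length) (by simp at hn ⊢; omega) (v :: t1) t2 (by simp)
            true o2 d1 d2 h1 h2.of_cons
            (fun x hx hx2 => hdisj x hx (List.mem_cons_of_mem _ hx2))
            (fun a ha b hb => hL1 a ha b (by cases hb with | inl h => exact Or.inl h | inr h => exact Or.inr (List.mem_cons_of_mem _ h)))
            (fun a ha b hb => hL2 a ha b (by cases hb with | inl h => exact Or.inl h | inr h => exact Or.inr (List.mem_cons_of_mem _ h)))]
          simp [keptP, if_neg hvw]
        | false =>
          rw [if_neg (by simp)]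
          rw [show d2 ++ w :: t2 = (d2 ++ [w]) ++ t2 by simp]
          rw [ih ((t1.length + 1) + t2.length) (by simp at hn ⊢; omega) (v :: t1) t2 (by simp)
            false (!o2) d1 (d2 ++ [w]) h1 h2.of_cons
            (fun x hx hx2 => hdisj x hx (List.mem_cons_of_mem _ hx2))
            (fun a ha b hb => hL1 a ha b (by cases hb with | inl h => exact Or.inl h | inr h => exact Or.inr (List.mem_cons_of_mem _ h)))
            (fun a ha b hb => by
              rcases List.mem_append.mp ha with ha' | ha'
              · exact hL2 a ha' b (by cases hb with | inl h => exact Or.inl h | inr h => exact Or.inr (List.mem_cons_of_mem _ h))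
              · have haw : a = w := by simpa using ha'
                subst haw
                cases hb with
                | inl h =>
                  rcases List.mem_cons.mp h with rfl | h
                  · exact hwv
                  · exact lt_trans hwv ((List.pairwise_cons.mp h1).1 b h)
                | inr h => exact (List.pairwise_cons.mp h2).1 b h)]
          simp [keptP, if_neg hvw]

theorem final_assembly (s : String) :
    find_real_semicols s = find_real_semicols_alt s := by
  have hq : ("'" : String) = String.mk ['\''] := rfl
  have hdq : ("\"" : String) = String.mk ['"'] := rfl
  have hsc : (";" : String) = String.mk [';'] := rfl
  have hp1 : (posOf '\'' s.toList).Pairwise (· < ·) := posOf_pairwise _ _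
  have hp2 : (posOf '"' s.toList).Pairwise (· < ·) := posOf_pairwise _ _
  have hdisj : ∀ x ∈ posOf '\'' s.toList, x ∉ posOf '"' s.toList :=
    posOf_disjoint (by decide) s.toList
  have hK := main_fold ((posOf '\'' s.toList).length + (posOf '"' s.toList).length)
    (posOf '\'' s.toList) (posOf '"' s.toList) rfl false false [] [] hp1 hp2 hdisj
    (by simp) (by simp)
  simp only [List.nil_append] at hK
  have hA : find_real_semicols s =
      (posOf ';' s.toList).filter (fun pos =>
        !(is_between_chars pos (keptP false false (posOf '\'' s.toList) (posOf '"' s.toList)).1 ||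
          is_between_chars pos (keptP false false (posOf '\'' s.toList) (posOf '"' s.toList)).2)) := by
    simp only [find_real_semicols, hq, hdq, hsc, gcp_single, commented_positions_nil]
    simp only [remove_from_list, List.foldl_nil]
    simp only [remove_chars_inside, sorted_eq_mergeL _ _ hp1 hp2 hdisj, hK]
    simpa using PySem.List.foldl_append_if_eq_filter
      (fun pos =>
        !(is_between_chars pos (keptP false false (posOf '\'' s.toList) (posOf '"' s.toList)).1 ||
          is_between_chars pos (keptP false false (posOf '\'' s.toList) (posOf '"' s.toList)).2))
      (posOf ';' s.toList) []
  have hB : find_real_semicols_alt s =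
      (posOf ';' s.toList).filter (fun pos =>
        !(bInside pos (keptP false false (posOf '\'' s.toList) (posOf '"' s.toList)).1 ||
          bInside pos (keptP false false (posOf '\'' s.toList) (posOf '"' s.toList)).2)) := by
    simp only [find_real_semicols_alt, collect_eq, bMergeLoop_eq_keptP, List.nil_append]
  rw [hA, hB]
  apply List.filter_congr
  intro p hp
  have hsub := keptP_sub false false (posOf '\'' s.toList) (posOf '"' s.toList)
  have hkp := keptP_pairwise false false (posOf '\'' s.toList) (posOf '"' s.toList) hp1 hp2
  have hn1 : p ∉ (keptP false false (posOf '\'' s.toList) (posOf '"' s.toList)).1 :=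
    fun h => posOf_disjoint (by decide : (';' : Char) ≠ '\'') s.toList p hp (hsub.1 p h)
  have hn2 : p ∉ (keptP false false (posOf '\'' s.toList) (posOf '"' s.toList)).2 :=
    fun h => posOf_disjoint (by decide : (';' : Char) ≠ '"') s.toList p hp (hsub.2 p h)
  rw [between_eq_inside p _ hkp.1 hn1, between_eq_inside p _ hkp.2 hn2]

-- ===== VERDICT (by name: the statement is the Claim_ definition above) =====
theorem find_real_semicols_spec : Claim_equal_find_real_semicols := by
  intro s _
  exact final_assembly s
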